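-- pv_equiv track=rewrite | github.com/NokKbl/IPv4-Subnet-Calculator | subcal/views.py | change_binary_two
-- ===== SOURCE A (Python) =====
-- def change_binary_two(text_class, number, all_ip,array):
--     if text_class == "Class A":
--         text = number_to_binary(int(all_ip[0]), 8)
--         for i in range(0, 8):
--             array[i] = str(text[i])
--     elif text_class == "Class B":
--         text = number_to_binary(int(all_ip[0]), 8)
--         for i in range(0, 8):
--             array[i] = str(text[i])
--         text = number_to_binary(int(all_ip[1]), 8)
--         for i in range(8, 16):
--             array[i] = str(text[i-8])
--     elif text_class == "Class C":
--         text = number_to_binary(int(all_ip[0]), 8)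
--         for i in range(0, 8):
--             array[i] = str(text[i])
--         text = number_to_binary(int(all_ip[1]), 8)
--         for i in range(8, 16):
--             array[i] = str(text[i-8])
--         text = number_to_binary(int(all_ip[2]), 8)
--         for i in range(16, 24):
--             array[i] = str(text[i-16])
--     elif text_class == "Class D":
--         text = number_to_binary(int(all_ip[0]), 8)
--         for i in range(0, 8):
--             array[i] = str(text[i])
--     elif text_class == "Class E":
--         text = number_to_binary(int(all_ip[0]), 8)
--         for i in range(0, 8):
--             array[i] = str(text[i])
--     return array
--
-- def number_to_binary(number, upper_bound):
--     text = "{0:b}".format(number)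
--     count = len(text)
--     zero = ""
--     summary = ""
--     for i in range (1,upper_bound - count+1):
--        zero +="0"
--     summary = zero+text
--     return summary
-- ===== SOURCE B (Python) =====
-- CLASS_OCTETS = {"Class A": 1, "Class B": 2, "Class C": 3, "Class D": 1, "Class E": 1}
--
-- def change_binary_two(text_class, number, all_ip, array):
--     bits = [ch for octet in all_ip[:CLASS_OCTETS.get(text_class, 0)]
--                for ch in format(int(octet), "b").rjust(8, "0")[:8]]
--     array[:len(bits)] = bits
--     return array
-- ===== Notes on version B (the rewrite author's own statement) =====
-- stated objective: simpler
-- what changed: A's five-branch if-chain of unrolled in-place indexed writes (array[i]=str(text[i]) with a zero-padding loop helper) is replaced by a class-to-octet-count dict selecting a prefix of all_ip, one flat comprehension concatenating the rjust-padded binary strings of those octets, and a single slice assignment splicing them over the front of array.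
import Mathlib
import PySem

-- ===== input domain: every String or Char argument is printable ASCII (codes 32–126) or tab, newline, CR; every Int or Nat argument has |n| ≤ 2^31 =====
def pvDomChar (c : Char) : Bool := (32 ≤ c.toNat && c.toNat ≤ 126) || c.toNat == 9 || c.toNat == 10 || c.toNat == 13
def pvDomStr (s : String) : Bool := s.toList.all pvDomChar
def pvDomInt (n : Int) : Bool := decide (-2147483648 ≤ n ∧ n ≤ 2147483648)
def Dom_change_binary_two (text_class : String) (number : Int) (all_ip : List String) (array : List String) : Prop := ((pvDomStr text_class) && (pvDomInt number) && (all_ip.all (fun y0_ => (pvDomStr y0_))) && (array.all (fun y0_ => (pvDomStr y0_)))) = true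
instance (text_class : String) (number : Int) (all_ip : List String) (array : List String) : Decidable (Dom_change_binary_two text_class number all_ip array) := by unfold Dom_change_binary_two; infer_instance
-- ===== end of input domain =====

-- B replaces A's five-branch if-chain of in-place indexed writes by a flat comprehension: a
-- class→octet-count dict picks a prefix of all_ip, one comprehension concatenates the 8-bit
-- strings of those octets, and a single slice assignment splices them over the front of array
-- (objective: simpler). Both Pythons mutate `array` identically on Pre_; return value is proved.


-- str(text[i]) for a string text: the one-character string at (Int) index i ("" only where Python would raise)
def pvStrAt (text : String) (i : Int) : String :=
  match PySem.Str.pyGet? text i with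
  | some c => String.ofList [c]
  | none => ""

-- int(s) totalised: Pre_ guarantees the parse succeeds wherever it is used
def pvInt (s : String) : Int := (PySem.Int.ofStr? s).getD 0

-- int(all_ip[o]) for A: Pre_ guarantees the index is in range and the parse succeeds
def pvOctet (all_ip : List String) (o : Int) : Int :=
  pvInt (PySem.List.pyGetD all_ip o "")

-- ===== PORT A =====
def number_to_binary (number : Int) (upper_bound : Int) : String :=
  let text := PySem.Int.toBin number
  let count : Int := PySem.Str.len text
  let zero := ""
  let summary := ""
  let zero := (PySem.List.pyRange 1 (upper_bound - count + 1) 1).foldl (fun z _ => z ++ "0") zero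
  let summary := zero ++ text
  summary

def change_binary_two (text_class : String) (number : Int) (all_ip : List String) (array : List String) : List String :=
  if text_class = "Class A" then
    let text := number_to_binary (pvOctet all_ip 0) 8
    (PySem.List.pyRange 0 8 1).foldl (fun arr i => PySem.List.pySetD arr i (pvStrAt text i)) array
  else if text_class = "Class B" then
    let text := number_to_binary (pvOctet all_ip 0) 8
    let array := (PySem.List.pyRange 0 8 1).foldl (fun arr i => PySem.List.pySetD arr i (pvStrAt text i)) array
    let text := number_to_binary (pvOctet all_ip 1) 8
    (PySem.List.pyRange 8 16 1).foldl (fun arr i => PySem.List.pySetD arr i (pvStrAt text (i - 8))) array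
  else if text_class = "Class C" then
    let text := number_to_binary (pvOctet all_ip 0) 8
    let array := (PySem.List.pyRange 0 8 1).foldl (fun arr i => PySem.List.pySetD arr i (pvStrAt text i)) array
    let text := number_to_binary (pvOctet all_ip 1) 8
    let array := (PySem.List.pyRange 8 16 1).foldl (fun arr i => PySem.List.pySetD arr i (pvStrAt text (i - 8))) array
    let text := number_to_binary (pvOctet all_ip 2) 8
    (PySem.List.pyRange 16 24 1).foldl (fun arr i => PySem.List.pySetD arr i (pvStrAt text (i - 16))) array
  else if text_class = "Class D" then
    let text := number_to_binary (pvOctet all_ip 0) 8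
    (PySem.List.pyRange 0 8 1).foldl (fun arr i => PySem.List.pySetD arr i (pvStrAt text i)) array
  else if text_class = "Class E" then
    let text := number_to_binary (pvOctet all_ip 0) 8
    (PySem.List.pyRange 0 8 1).foldl (fun arr i => PySem.List.pySetD arr i (pvStrAt text i)) array
  else
    array

-- ===== PORT B =====
-- the module-level CLASS_OCTETS dict of Source B
def pvClassOctets : PySem.Dict String Int :=
  PySem.Dict.ofList [("Class A", 1), ("Class B", 2), ("Class C", 3), ("Class D", 1), ("Class E", 1)]

-- format(int(octet), "b").rjust(8, "0")[:8], as the list of its 1-character strings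
-- (rjust(8,'0') prepends max(0, 8 - len) zeros: ported by hand, exact)
def pvOctetBits (octet : String) : List String :=
  let cs := (PySem.Int.toBin (pvInt octet)).toList
  ((List.replicate (8 - cs.length) '0' ++ cs).take 8).map (fun c => String.ofList [c])

def change_binary_two_alt (text_class : String) (number : Int) (all_ip : List String) (array : List String) : List String :=
  let bits := (PySem.List.slice all_ip none (some (PySem.Dict.getD pvClassOctets text_class 0))).flatMap pvOctetBits
  -- array[:len(bits)] = bits; return array  — the returned list
  bits ++ PySem.List.slice array (some (bits.length : Int)) none

-- ===== PRECONDITION & SPEC =====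
-- Pre_ excludes exactly the inputs where Python A raises: a needed octet missing from all_ip
-- (IndexError), a needed octet that int() cannot parse (ValueError), or array too short for the
-- writes (IndexError on assignment).
def Pre_change_binary_two (text_class : String) (number : Int) (all_ip : List String) (array : List String) : Prop :=
  let c : Nat := if text_class = "Class A" ∨ text_class = "Class D" ∨ text_class = "Class E" then 1
                 else if text_class = "Class B" then 2
                 else if text_class = "Class C" then 3 else 0
  c ≤ all_ip.length ∧ 8 * c ≤ array.length ∧
    ∀ o < c, (PySem.Int.ofStr? (all_ip.getD o "")).isSome
instance (text_class : String) (number : Int) (all_ip : List String) (array : List String) : Decidable (Pre_change_binary_two text_class number all_ip array) := by unfold Pre_change_binary_two; infer_instance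

def pvWitness_change_binary_two : String × Int × List String × List String :=
  ("Class A", 0, ["10"], ["x", "x", "x", "x", "x", "x", "x", "x"])

def Spec_change_binary_two (text_class : String) (number : Int) (all_ip : List String) (array : List String) (out : List String) : Prop := out = change_binary_two_alt text_class number all_ip array
instance (text_class : String) (number : Int) (all_ip : List String) (array : List String) (out : List String) : Decidable (Spec_change_binary_two text_class number all_ip array out) := by unfold Spec_change_binary_two; infer_instance

-- ===== CLAIM (what is proved, stated in full; the proofs are below) =====
def Claim_equal_change_binary_two : Prop := ∀ (text_class : String) (number : Int) (all_ip : List String) (array : List String), Dom_change_binary_two text_class number all_ip array → Pre_change_binary_two text_class number all_ip array → Spec_change_binary_two text_class number all_ip array (change_binary_two text_class number all_ip array)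

-- ===== LEMMAS AND PROOFS =====

-- the zero-building loop of A's helper appends exactly one '0' per range element
theorem foldl_append_zero (l : List Int) (s : String) :
    l.foldl (fun z _ => z ++ "0") s = s ++ String.ofList (List.replicate l.length '0') := by
  induction l generalizing s with
  | nil => simp
  | cons x t ih =>
      simp only [List.foldl_cons, ih, List.length_cons, List.replicate_succ]
      apply String.ext
      simp

-- A's helper, characterised on the char-list side (this is rjust(8,'0') of the binary digits)
theorem ntb_toList (n : Int) :
    (number_to_binary n 8).toList
      = List.replicate (8 - (PySem.Int.toBin n).toList.length) '0' ++ (PySem.Int.toBin n).toList := by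
  unfold number_to_binary
  simp only [foldl_append_zero, PySem.List.length_pyRange_one]
  have h : ((8:Int) - PySem.Str.len (PySem.Int.toBin n) + 1 - 1).toNat
      = 8 - (PySem.Int.toBin n).toList.length := by
    simp [PySem.Str.len_eq]
  rw [h]
  simp

theorem ntb_len (n : Int) : 8 ≤ (number_to_binary n 8).toList.length := by
  rw [ntb_toList]
  simp
  omega

theorem exists_cons8 {α : Type} (l : List α) (h : 8 ≤ l.length) :
    ∃ c0 c1 c2 c3 c4 c5 c6 c7 rest, l = c0::c1::c2::c3::c4::c5::c6::c7::rest := by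
  rcases l with _|⟨c0,l⟩; · simp at h
  rcases l with _|⟨c1,l⟩; · simp at h
  rcases l with _|⟨c2,l⟩; · simp at h
  rcases l with _|⟨c3,l⟩; · simp at h
  rcases l with _|⟨c4,l⟩; · simp at h
  rcases l with _|⟨c5,l⟩; · simp at h
  rcases l with _|⟨c6,l⟩; · simp at h
  rcases l with _|⟨c7,l⟩; · simp at h
  exact ⟨c0,c1,c2,c3,c4,c5,c6,c7,l,rfl⟩

theorem strAt_of_toList (t : String) (j : Nat) (h : j < t.toList.length) :
    pvStrAt t (j : Int) = String.ofList [t.toList[j]] := by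
  simp [pvStrAt, List.getElem?_eq_getElem h]

theorem take8_map (t : String) (c0 c1 c2 c3 c4 c5 c6 c7 : Char) (rest : List Char)
    (h : t.toList = c0::c1::c2::c3::c4::c5::c6::c7::rest) :
    ((t.toList.take 8).map (fun c => String.ofList [c]))
    = [pvStrAt t 0, pvStrAt t 1, pvStrAt t 2, pvStrAt t 3, pvStrAt t 4, pvStrAt t 5, pvStrAt t 6, pvStrAt t 7] := by
  have h0 := strAt_of_toList t 0 (by simp [h]);  have h1 := strAt_of_toList t 1 (by simp [h])
  have h2 := strAt_of_toList t 2 (by simp [h]);  have h3 := strAt_of_toList t 3 (by simp [h])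
  have h4 := strAt_of_toList t 4 (by simp [h]);  have h5 := strAt_of_toList t 5 (by simp [h])
  have h6 := strAt_of_toList t 6 (by simp [h]);  have h7 := strAt_of_toList t 7 (by simp [h])
  simp only [h] at h0 h1 h2 h3 h4 h5 h6 h7 ⊢
  simp at h0 h1 h2 h3 h4 h5 h6 h7
  simp [h0, h1, h2, h3, h4, h5, h6, h7]

-- B's per-octet block is exactly the 8 characters A writes for that octet
theorem octet_bits_eq (s : String) :
    pvOctetBits s
    = [pvStrAt (number_to_binary (pvInt s) 8) 0, pvStrAt (number_to_binary (pvInt s) 8) 1,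
       pvStrAt (number_to_binary (pvInt s) 8) 2, pvStrAt (number_to_binary (pvInt s) 8) 3,
       pvStrAt (number_to_binary (pvInt s) 8) 4, pvStrAt (number_to_binary (pvInt s) 8) 5,
       pvStrAt (number_to_binary (pvInt s) 8) 6, pvStrAt (number_to_binary (pvInt s) 8) 7] := by
  obtain ⟨c0,c1,c2,c3,c4,c5,c6,c7,rest,h⟩ := exists_cons8 _ (ntb_len (pvInt s))
  have := take8_map _ c0 c1 c2 c3 c4 c5 c6 c7 rest h
  rw [← this, pvOctetBits, ← ntb_toList (pvInt s)]
theorem write8_at0 (t : String) (x0 x1 x2 x3 x4 x5 x6 x7 : String) (rest : List String) :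
    (PySem.List.pyRange 0 8 1).foldl (fun arr i => PySem.List.pySetD arr i (pvStrAt t i))
      (x0::x1::x2::x3::x4::x5::x6::x7::rest)
    = [pvStrAt t 0, pvStrAt t 1, pvStrAt t 2, pvStrAt t 3, pvStrAt t 4, pvStrAt t 5, pvStrAt t 6, pvStrAt t 7] ++ rest := by
  rw [show PySem.List.pyRange 0 8 1 = [0,1,2,3,4,5,6,7] from by decide]
  simp [List.foldl, PySem.List.pySetD_of_nonneg, List.set, Int.reduceToNat]

theorem write8_at8 (t : String) (x0 x1 x2 x3 x4 x5 x6 x7 x8 x9 x10 x11 x12 x13 x14 x15 : String) (rest : List String) :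
    (PySem.List.pyRange 8 16 1).foldl (fun arr i => PySem.List.pySetD arr i (pvStrAt t (i - 8)))
      (x0::x1::x2::x3::x4::x5::x6::x7::x8::x9::x10::x11::x12::x13::x14::x15::rest)
    = x0::x1::x2::x3::x4::x5::x6::x7::([pvStrAt t 0, pvStrAt t 1, pvStrAt t 2, pvStrAt t 3, pvStrAt t 4, pvStrAt t 5, pvStrAt t 6, pvStrAt t 7] ++ rest) := by
  rw [show PySem.List.pyRange 8 16 1 = [8,9,10,11,12,13,14,15] from by decide]
  simp [List.foldl, PySem.List.pySetD_of_nonneg, List.set, Int.reduceToNat]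

theorem write8_at16 (t : String) (x0 x1 x2 x3 x4 x5 x6 x7 x8 x9 x10 x11 x12 x13 x14 x15 x16 x17 x18 x19 x20 x21 x22 x23 : String) (rest : List String) :
    (PySem.List.pyRange 16 24 1).foldl (fun arr i => PySem.List.pySetD arr i (pvStrAt t (i - 16)))
      (x0::x1::x2::x3::x4::x5::x6::x7::x8::x9::x10::x11::x12::x13::x14::x15::x16::x17::x18::x19::x20::x21::x22::x23::rest)
    = x0::x1::x2::x3::x4::x5::x6::x7::x8::x9::x10::x11::x12::x13::x14::x15::([pvStrAt t 0, pvStrAt t 1, pvStrAt t 2, pvStrAt t 3, pvStrAt t 4, pvStrAt t 5, pvStrAt t 6, pvStrAt t 7] ++ rest) := by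
  rw [show PySem.List.pyRange 16 24 1 = [16,17,18,19,20,21,22,23] from by decide]
  simp [List.foldl, PySem.List.pySetD_of_nonneg, List.set, Int.reduceToNat]


-- ===== VERDICT (by name: the statement is the Claim_ definition above) =====
theorem change_binary_two_spec : Claim_equal_change_binary_two := by
  intro tc n ip arr _ hpre
  unfold Pre_change_binary_two at hpre
  unfold Spec_change_binary_two change_binary_two change_binary_two_alt
  dsimp only
  split_ifs with h1 h2 h3 h4 h5
  · -- Class A
    subst h1
    norm_num at hpre
    obtain ⟨hip, harr, -⟩ := hpre
    rcases ip with _|⟨p0,ipr⟩; · simp at hip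
    obtain ⟨a0,a1,a2,a3,a4,a5,a6,a7,rest,he⟩ := exists_cons8 arr (by omega)
    subst he
    rw [write8_at0,
        show PySem.Dict.getD pvClassOctets "Class A" 0 = 1 from by decide,
        show pvOctet (p0::ipr) 0 = pvInt p0 from by simp [pvOctet, PySem.List.pyGetD_zero_cons]]
    rw [PySem.List.slice_from_natCast,
        show PySem.List.slice (p0::ipr) none (some 1) = [p0] from rfl]
    simp only [List.flatMap_cons, List.flatMap_nil, List.append_nil, octet_bits_eq,
      List.cons_append, List.nil_append]
    simp
  · -- Class B
    subst h2
    norm_num at hpre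
    obtain ⟨hip, harr, -⟩ := hpre
    rcases ip with _|⟨p0,ip⟩; · simp at hip
    rcases ip with _|⟨p1,ip⟩; · simp at hip; try omega
    obtain ⟨a0,a1,a2,a3,a4,a5,a6,a7,r1,he0⟩ := exists_cons8 arr (by have hx := harr; simp at hx; omega)
    subst he0
    obtain ⟨b0,b1,b2,b3,b4,b5,b6,b7,rest,he1⟩ := exists_cons8 r1 (by have hx := harr; simp at hx; omega)
    subst he1
    rw [write8_at0]
    simp only [List.cons_append, List.nil_append]
    rw [write8_at8]
    rw [show PySem.Dict.getD pvClassOctets "Class B" 0 = 2 from by decide]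
    rw [show pvOctet (p0::p1::ip) 0 = pvInt p0 from by simp [pvOctet, PySem.List.pyGetD_zero_cons]]
    rw [show pvOctet (p0::p1::ip) 1 = pvInt p1 from by rw [pvOctet, show ((1:Int)) = ((1:Nat):Int) from rfl, PySem.List.pyGetD_natCast]; rfl]
    rw [PySem.List.slice_from_natCast,
        show PySem.List.slice (p0::p1::ip) none (some 2) = [p0,p1] from rfl]
    simp only [List.flatMap_cons, List.flatMap_nil, List.append_nil, octet_bits_eq,
      List.cons_append, List.nil_append]
    simp
  · -- Class C
    subst h3
    norm_num at hpre
    obtain ⟨hip, harr, -⟩ := hpre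
    rcases ip with _|⟨p0,ip⟩; · simp at hip
    rcases ip with _|⟨p1,ip⟩; · simp at hip; try omega
    rcases ip with _|⟨p2,ip⟩; · simp at hip; try omega
    obtain ⟨a0,a1,a2,a3,a4,a5,a6,a7,r1,he0⟩ := exists_cons8 arr (by have hx := harr; simp at hx; omega)
    subst he0
    obtain ⟨b0,b1,b2,b3,b4,b5,b6,b7,r2,he1⟩ := exists_cons8 r1 (by have hx := harr; simp at hx; omega)
    subst he1
    obtain ⟨c0,c1,c2,c3,c4,c5,c6,c7,rest,he2⟩ := exists_cons8 r2 (by have hx := harr; simp at hx; omega)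
    subst he2
    rw [write8_at0]
    simp only [List.cons_append, List.nil_append]
    rw [write8_at8]
    simp only [List.cons_append, List.nil_append]
    rw [write8_at16]
    rw [show PySem.Dict.getD pvClassOctets "Class C" 0 = 3 from by decide]
    rw [show pvOctet (p0::p1::p2::ip) 0 = pvInt p0 from by simp [pvOctet, PySem.List.pyGetD_zero_cons]]
    rw [show pvOctet (p0::p1::p2::ip) 1 = pvInt p1 from by rw [pvOctet, show ((1:Int)) = ((1:Nat):Int) from rfl, PySem.List.pyGetD_natCast]; rfl]
    rw [show pvOctet (p0::p1::p2::ip) 2 = pvInt p2 from by rw [pvOctet, show ((2:Int)) = ((2:Nat):Int) from rfl, PySem.List.pyGetD_natCast]; rfl]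
    rw [PySem.List.slice_from_natCast,
        show PySem.List.slice (p0::p1::p2::ip) none (some 3) = [p0,p1,p2] from rfl]
    simp only [List.flatMap_cons, List.flatMap_nil, List.append_nil, octet_bits_eq,
      List.cons_append, List.nil_append]
    simp
  · -- Class D
    subst h4
    norm_num at hpre
    obtain ⟨hip, harr, -⟩ := hpre
    rcases ip with _|⟨p0,ip⟩; · simp at hip
    obtain ⟨a0,a1,a2,a3,a4,a5,a6,a7,rest,he0⟩ := exists_cons8 arr (by have hx := harr; simp at hx; omega)
    subst he0
    rw [write8_at0]
    rw [show PySem.Dict.getD pvClassOctets "Class D" 0 = 1 from by decide]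
    rw [show pvOctet (p0::ip) 0 = pvInt p0 from by simp [pvOctet, PySem.List.pyGetD_zero_cons]]
    rw [PySem.List.slice_from_natCast,
        show PySem.List.slice (p0::ip) none (some 1) = [p0] from rfl]
    simp only [List.flatMap_cons, List.flatMap_nil, List.append_nil, octet_bits_eq,
      List.cons_append, List.nil_append]
    simp
  · -- Class E
    subst h5
    norm_num at hpre
    obtain ⟨hip, harr, -⟩ := hpre
    rcases ip with _|⟨p0,ip⟩; · simp at hip
    obtain ⟨a0,a1,a2,a3,a4,a5,a6,a7,rest,he0⟩ := exists_cons8 arr (by have hx := harr; simp at hx; omega)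
    subst he0
    rw [write8_at0]
    rw [show PySem.Dict.getD pvClassOctets "Class E" 0 = 1 from by decide]
    rw [show pvOctet (p0::ip) 0 = pvInt p0 from by simp [pvOctet, PySem.List.pyGetD_zero_cons]]
    rw [PySem.List.slice_from_natCast,
        show PySem.List.slice (p0::ip) none (some 1) = [p0] from rfl]
    simp only [List.flatMap_cons, List.flatMap_nil, List.append_nil, octet_bits_eq,
      List.cons_append, List.nil_append]
    simp
  · -- no recognised class: both return array unchanged
    have g1 : ("Class A" == tc) = false := by simp; exact fun h => h1 h.symm
    have g2 : ("Class B" == tc) = false := by simp; exact fun h => h2 h.symm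
    have g3 : ("Class C" == tc) = false := by simp; exact fun h => h3 h.symm
    have g4 : ("Class D" == tc) = false := by simp; exact fun h => h4 h.symm
    have g5 : ("Class E" == tc) = false := by simp; exact fun h => h5 h.symm
    rw [show PySem.Dict.getD pvClassOctets tc 0 = 0 from by
        simp [pvClassOctets, PySem.Dict.getD, PySem.Dict.get?, PySem.Dict.ofList, PySem.Dict.update, PySem.Dict.insert, PySem.Dict.empty, PySem.Dict.contains, List.find?, g1, g2, g3, g4, g5]]
    simp [pysem]
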